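-- pv_equiv track=rewrite | github.com/duochen/Python-Beginner | LearnToCodeBySolvingProblems/ch6/coci13c2p2.py | mirko_location
-- ===== SOURCE A (Python) =====
-- def num_neighbours(grid, row, col):
--     """
--     grid is a grid of seating information.
--     row is a row index in grid.
--     col is a column index in grid.
--
--     Return number of neighbours of grid[row][col]
--     """
--     biggest_row = len(grid) - 1
--     biggest_col = len(grid[0]) - 1
--     total = 0
--
--     # Eight directions to check
--
--     # Right
--     if col < biggest_col and grid[row][col + 1] == 'o':
--         total = total + 1
--     # Left
--     if col > 0 and grid[row][col - 1] == 'o':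
--         total = total + 1
--     # Down
--     if row < biggest_row and grid[row + 1][col] == 'o':
--         total = total + 1
--     # Up
--     if row > 0 and grid[row - 1][col] == 'o':
--         total = total + 1
--     # Right down
--     if (col < biggest_col and row < biggest_row and
--             grid[row + 1][col + 1] == 'o'):
--         total = total + 1
--     # Right up
--     if col < biggest_col and row > 0 and grid[row - 1][col + 1] == 'o':
--         total = total + 1
--     # Left down
--     if col > 0 and row < biggest_row and grid[row + 1][col - 1] == 'o':
--         total = total + 1
--     # Left up
--     if col > 0 and row > 0 and grid[row - 1][col - 1] == 'o':
--         total = total + 1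
--
--     return total
--
-- def mirko_location(grid):
--     """
--     grid is a grid of seating information.
--
--     Return [row, col] of where Mirko will sit;
--     if there is no free seat, return [-1, -1].
--     """
--     mirko_row = -1
--     mirko_col = -1
--     most = 0
--     for row in range(len(grid)):
--         for col in range(len(grid[0])):
--             if grid[row][col] == '.':
--                 neighbours = num_neighbours(grid, row, col)
--                 if neighbours > most:
--                     most = neighbours
--                     mirko_row = row
--                     mirko_col = col
--     return [mirko_row, mirko_col]
-- ===== SOURCE B (Python) =====
-- def mirko_location(grid):
--     """
--     grid is a grid of seating information.
--
--     Return [row, col] of where Mirko will sit;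
--     if there is no free seat, return [-1, -1].
--     """
--     if not grid:
--         return [-1, -1]
--     h, w = len(grid), len(grid[0])
--     # 0/1 occupancy table over the w-column window, then a horizontal
--     # 3-wide sum per row; a cell's neighbour count is the vertical sum of
--     # three horizontal sums (the centre cell is '.', so it contributes 0).
--     occ = [[1 if row[c] == 'o' else 0 for c in range(w)] for row in grid]
--     hs = [[(r[c - 1] if c > 0 else 0) + r[c] + (r[c + 1] if c + 1 < w else 0)
--            for c in range(w)] for r in occ]
--     zero = [0] * w
--     mirko_row, mirko_col, most = -1, -1, 0
--     for row in range(h):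
--         up = hs[row - 1] if row > 0 else zero
--         dn = hs[row + 1] if row + 1 < h else zero
--         mid = hs[row]
--         for col in range(w):
--             if grid[row][col] == '.':
--                 neighbours = up[col] + mid[col] + dn[col]
--                 if neighbours > most:
--                     most = neighbours
--                     mirko_row, mirko_col = row, col
--     return [mirko_row, mirko_col]
-- ===== Notes on version B (the rewrite author's own statement) =====
-- stated objective: alternative
-- what changed: B precomputes a 0/1 occupancy table and a per-row horizontal 3-window sum once (a separable convolution), so each free cell's neighbour count is three table lookups instead of A's eight boundary-checked per-cell probes via a helper function.
import Mathlib
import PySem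

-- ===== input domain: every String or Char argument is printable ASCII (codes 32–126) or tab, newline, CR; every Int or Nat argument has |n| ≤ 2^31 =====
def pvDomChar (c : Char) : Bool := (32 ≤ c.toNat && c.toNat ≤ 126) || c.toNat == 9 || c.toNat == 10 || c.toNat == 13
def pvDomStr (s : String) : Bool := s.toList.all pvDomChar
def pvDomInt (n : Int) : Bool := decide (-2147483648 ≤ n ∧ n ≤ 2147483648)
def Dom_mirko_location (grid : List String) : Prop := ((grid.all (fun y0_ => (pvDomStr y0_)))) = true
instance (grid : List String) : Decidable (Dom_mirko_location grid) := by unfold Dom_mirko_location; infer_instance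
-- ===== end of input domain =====

-- B builds a 0/1 occupancy table and per-row horizontal 3-window sums once, so a cell's
-- neighbour count is three table lookups instead of A's eight boundary-checked probes.

-- shared indexing helper: grid[r][c] for nonnegative indices; exact wherever the Python
-- indexing does not raise (inside Pre_ every index either is in range or sits under a
-- bounds guard, so the default is never the value used)
def pvCell (grid : List String) (r c : Nat) : Char :=
  ((grid.getD r "").toList).getD c ' '

-- ===== PORT A =====
def num_neighbours (grid : List String) (row col : Nat) : Int :=
  let biggestRow : Int := (grid.length : Int) - 1
  let biggestCol : Int := ((grid.headD "").length : Int) - 1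
  let total : Int := 0
  let total := if (col : Int) < biggestCol ∧ pvCell grid row (col + 1) = 'o' then total + 1 else total
  let total := if 0 < col ∧ pvCell grid row (col - 1) = 'o' then total + 1 else total
  let total := if (row : Int) < biggestRow ∧ pvCell grid (row + 1) col = 'o' then total + 1 else total
  let total := if 0 < row ∧ pvCell grid (row - 1) col = 'o' then total + 1 else total
  let total := if (col : Int) < biggestCol ∧ (row : Int) < biggestRow ∧ pvCell grid (row + 1) (col + 1) = 'o' then total + 1 else total
  let total := if (col : Int) < biggestCol ∧ 0 < row ∧ pvCell grid (row - 1) (col + 1) = 'o' then total + 1 else total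
  let total := if 0 < col ∧ (row : Int) < biggestRow ∧ pvCell grid (row + 1) (col - 1) = 'o' then total + 1 else total
  let total := if 0 < col ∧ 0 < row ∧ pvCell grid (row - 1) (col - 1) = 'o' then total + 1 else total
  total

def mirko_location (grid : List String) : List Int :=
  let st := (List.range grid.length).foldl (fun st row =>
    (List.range (grid.headD "").length).foldl (fun st col =>
      if pvCell grid row col = '.' then
        let neighbours := num_neighbours grid row col
        if neighbours > st.2.2 then ((row : Int), (col : Int), neighbours) else st
      else st) st) ((-1 : Int), (-1 : Int), (0 : Int))
  [st.1, st.2.1]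

-- ===== PORT B =====
def pvOccRow (w : Nat) (row : String) : List Int :=
  (List.range w).map (fun c => if row.toList.getD c ' ' = 'o' then 1 else 0)

def pvHsRow (w : Nat) (r : List Int) : List Int :=
  (List.range w).map (fun c =>
    (if 0 < c then r.getD (c - 1) 0 else 0) + r.getD c 0 + (if c + 1 < w then r.getD (c + 1) 0 else 0))

def mirko_location_alt (grid : List String) : List Int :=
  if grid.isEmpty then [-1, -1] else
  let h := grid.length
  let w := (grid.headD "").length
  let occ := grid.map (pvOccRow w)
  let hs := occ.map (pvHsRow w)
  let zero : List Int := List.replicate w 0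
  let st := (List.range h).foldl (fun st row =>
    let up := if 0 < row then hs.getD (row - 1) [] else zero
    let dn := if row + 1 < h then hs.getD (row + 1) [] else zero
    let mid := hs.getD row []
    (List.range w).foldl (fun st col =>
      if pvCell grid row col = '.' then
        let neighbours := up.getD col 0 + mid.getD col 0 + dn.getD col 0
        if neighbours > st.2.2 then ((row : Int), (col : Int), neighbours) else st
      else st) st) ((-1 : Int), (-1 : Int), (0 : Int))
  [st.1, st.2.1]

-- ===== PRECONDITION & SPEC =====
-- Pre_ excludes exactly the ragged grids on which Python A raises IndexError
-- (a row shorter than row 0, indexed while A scans columns 0..len(grid[0])-1);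
-- the Python B raises there as well.
def Pre_mirko_location (grid : List String) : Prop :=
  ∀ row ∈ grid, (grid.headD "").length ≤ row.length
instance (grid : List String) : Decidable (Pre_mirko_location grid) := by
  unfold Pre_mirko_location; infer_instance
def pvWitness_mirko_location : List String := ["..", "oo"]

def Spec_mirko_location (grid : List String) (out : List Int) : Prop := out = mirko_location_alt grid
instance (grid : List String) (out : List Int) : Decidable (Spec_mirko_location grid out) := by unfold Spec_mirko_location; infer_instance

-- ===== CLAIM (what is proved, stated in full; the proofs are below) =====
def Claim_equal_mirko_location : Prop := ∀ (grid : List String), Dom_mirko_location grid → Pre_mirko_location grid → Spec_mirko_location grid (mirko_location grid)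

-- ===== LEMMAS AND PROOFS =====
def pvInd (p : Prop) [Decidable p] : Int := if p then 1 else 0

theorem pvInd_congr {p q : Prop} [Decidable p] [Decidable q] (h : p ↔ q) : pvInd p = pvInd q := by
  simp [pvInd, h]

theorem if_add_one {p : Prop} [Decidable p] (t : Int) : (if p then t + 1 else t) = t + pvInd p := by
  by_cases h : p <;> simp [pvInd, h]

theorem occRow_getD (row : String) (w c : Nat) (hc : c < w) :
    (pvOccRow w row).getD c 0 = pvInd (row.toList.getD c ' ' = 'o') := by
  unfold pvOccRow pvInd
  rw [PySem.List.getD_map_range _ w c 0 hc]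

theorem hsRow_getD (w : Nat) (r : List Int) (c : Nat) (hc : c < w) :
    (pvHsRow w r).getD c 0 =
      (if 0 < c then r.getD (c - 1) 0 else 0) + r.getD c 0 + (if c + 1 < w then r.getD (c + 1) 0 else 0) := by
  unfold pvHsRow
  rw [PySem.List.getD_map_range _ w c 0 hc]

theorem hs_getD (grid : List String) (r c : Nat) (hr : r < grid.length)
    (hc : c < (grid.headD "").length) :
    (((grid.map (pvOccRow (grid.headD "").length)).map (pvHsRow (grid.headD "").length)).getD r []).getD c 0 =
      pvInd (0 < c ∧ pvCell grid r (c - 1) = 'o') + pvInd (pvCell grid r c = 'o') +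
        pvInd ((c : Int) < ((grid.headD "").length : Int) - 1 ∧ pvCell grid r (c + 1) = 'o') := by
  set W := (grid.headD "").length with hW
  have hr2 : r < (grid.map (pvOccRow W)).length := by simpa
  rw [PySem.List.getD_map_of_lt _ _ r [] hr2, List.getElem_map, hsRow_getD _ _ _ hc]
  have e1 : ∀ x, x < W →
      (pvOccRow W grid[r]).getD x 0 = pvInd (pvCell grid r x = 'o') := by
    intro x hx
    rw [occRow_getD _ _ _ hx]
    apply pvInd_congr
    unfold pvCell
    rw [List.getD_eq_getElem _ _ hr]
  have t1 : (if 0 < c then (pvOccRow W grid[r]).getD (c - 1) 0 else 0)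
      = pvInd (0 < c ∧ pvCell grid r (c - 1) = 'o') := by
    by_cases h1 : 0 < c
    · rw [if_pos h1, e1 _ (by omega)]
      exact pvInd_congr (by tauto)
    · rw [if_neg h1]
      simp [pvInd, h1]
  have t3 : (if c + 1 < W then (pvOccRow W grid[r]).getD (c + 1) 0 else 0)
      = pvInd ((c : Int) < (W : Int) - 1 ∧ pvCell grid r (c + 1) = 'o') := by
    by_cases h2 : c + 1 < W
    · rw [if_pos h2, e1 _ h2]
      exact pvInd_congr (Iff.intro (fun h => ⟨by omega, h⟩) (fun h => h.2))
    · rw [if_neg h2]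
      have : ¬ ((c : Int) < (W : Int) - 1) := by omega
      simp [pvInd, this]
  rw [t1, t3, e1 c hc]

theorem band_up (grid : List String) (row col : Nat) (hr : row < grid.length)
    (hc : col < (grid.headD "").length) :
    ((if 0 < row then ((grid.map (pvOccRow (grid.headD "").length)).map (pvHsRow (grid.headD "").length)).getD (row - 1) [] else List.replicate (grid.headD "").length 0).getD col 0) =
      pvInd (0 < col ∧ 0 < row ∧ pvCell grid (row - 1) (col - 1) = 'o') +
        pvInd (0 < row ∧ pvCell grid (row - 1) col = 'o') +
        pvInd ((col : Int) < ((grid.headD "").length : Int) - 1 ∧ 0 < row ∧ pvCell grid (row - 1) (col + 1) = 'o') := by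
  by_cases hu : 0 < row
  · rw [if_pos hu, hs_getD grid (row - 1) col (by omega) hc,
      pvInd_congr (p := 0 < col ∧ pvCell grid (row - 1) (col - 1) = 'o') (q := 0 < col ∧ 0 < row ∧ pvCell grid (row - 1) (col - 1) = 'o') (by tauto),
      pvInd_congr (p := pvCell grid (row - 1) col = 'o') (q := 0 < row ∧ pvCell grid (row - 1) col = 'o') (by tauto),
      pvInd_congr (p := (col : Int) < ((grid.headD "").length : Int) - 1 ∧ pvCell grid (row - 1) (col + 1) = 'o') (q := (col : Int) < ((grid.headD "").length : Int) - 1 ∧ 0 < row ∧ pvCell grid (row - 1) (col + 1) = 'o') (by tauto)]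
  · rw [if_neg hu]
    simp [pvInd, hu]

theorem band_dn (grid : List String) (row col : Nat) (hr : row < grid.length)
    (hc : col < (grid.headD "").length) :
    ((if row + 1 < grid.length then ((grid.map (pvOccRow (grid.headD "").length)).map (pvHsRow (grid.headD "").length)).getD (row + 1) [] else List.replicate (grid.headD "").length 0).getD col 0) =
      pvInd (0 < col ∧ (row : Int) < (grid.length : Int) - 1 ∧ pvCell grid (row + 1) (col - 1) = 'o') +
        pvInd ((row : Int) < (grid.length : Int) - 1 ∧ pvCell grid (row + 1) col = 'o') +
        pvInd ((col : Int) < ((grid.headD "").length : Int) - 1 ∧ (row : Int) < (grid.length : Int) - 1 ∧ pvCell grid (row + 1) (col + 1) = 'o') := by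
  by_cases hd : row + 1 < grid.length
  · have hd' : (row : Int) < (grid.length : Int) - 1 := by omega
    rw [if_pos hd, hs_getD grid (row + 1) col (by omega) hc,
      pvInd_congr (p := 0 < col ∧ pvCell grid (row + 1) (col - 1) = 'o') (q := 0 < col ∧ (row : Int) < (grid.length : Int) - 1 ∧ pvCell grid (row + 1) (col - 1) = 'o') (by tauto),
      pvInd_congr (p := pvCell grid (row + 1) col = 'o') (q := (row : Int) < (grid.length : Int) - 1 ∧ pvCell grid (row + 1) col = 'o') (by tauto),
      pvInd_congr (p := (col : Int) < ((grid.headD "").length : Int) - 1 ∧ pvCell grid (row + 1) (col + 1) = 'o') (q := (col : Int) < ((grid.headD "").length : Int) - 1 ∧ (row : Int) < (grid.length : Int) - 1 ∧ pvCell grid (row + 1) (col + 1) = 'o') (by tauto)]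
  · have hd' : ¬ ((row : Int) < (grid.length : Int) - 1) := by omega
    rw [if_neg hd]
    simp [pvInd, hd']

theorem band_mid (grid : List String) (row col : Nat) (hr : row < grid.length)
    (hc : col < (grid.headD "").length) (hdot : pvCell grid row col = '.') :
    ((((grid.map (pvOccRow (grid.headD "").length)).map (pvHsRow (grid.headD "").length)).getD row []).getD col 0) =
      pvInd (0 < col ∧ pvCell grid row (col - 1) = 'o') +
        pvInd ((col : Int) < ((grid.headD "").length : Int) - 1 ∧ pvCell grid row (col + 1) = 'o') := by
  rw [hs_getD grid row col hr hc]
  have hz : pvInd (pvCell grid row col = 'o') = 0 := by simp [pvInd, hdot]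
  rw [hz]
  ring

theorem cell_eq (grid : List String) (row col : Nat) (hr : row < grid.length)
    (hc : col < (grid.headD "").length) (hdot : pvCell grid row col = '.') :
    (if 0 < row then ((grid.map (pvOccRow (grid.headD "").length)).map (pvHsRow (grid.headD "").length)).getD (row - 1) [] else List.replicate (grid.headD "").length 0).getD col 0 +
      (((grid.map (pvOccRow (grid.headD "").length)).map (pvHsRow (grid.headD "").length)).getD row []).getD col 0 +
      (if row + 1 < grid.length then ((grid.map (pvOccRow (grid.headD "").length)).map (pvHsRow (grid.headD "").length)).getD (row + 1) [] else List.replicate (grid.headD "").length 0).getD col 0 =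
      num_neighbours grid row col := by
  rw [band_up grid row col hr hc, band_mid grid row col hr hc hdot, band_dn grid row col hr hc]
  simp only [num_neighbours, if_add_one]
  ring

theorem ports_eq (grid : List String) : mirko_location grid = mirko_location_alt grid := by
  rcases eq_or_ne grid [] with h | h
  · subst h; rfl
  · unfold mirko_location mirko_location_alt
    rw [if_neg (by simpa using h)]
    have hfold : (List.range grid.length).foldl (fun st row =>
        (List.range (grid.headD "").length).foldl (fun st col =>
          if pvCell grid row col = '.' then
            let neighbours := num_neighbours grid row col
            if neighbours > st.2.2 then ((row : Int), (col : Int), neighbours) else st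
          else st) st) ((-1 : Int), (-1 : Int), (0 : Int)) =
        (List.range grid.length).foldl (fun st row =>
          let up := if 0 < row then ((grid.map (pvOccRow (grid.headD "").length)).map (pvHsRow (grid.headD "").length)).getD (row - 1) [] else List.replicate (grid.headD "").length 0
          let dn := if row + 1 < grid.length then ((grid.map (pvOccRow (grid.headD "").length)).map (pvHsRow (grid.headD "").length)).getD (row + 1) [] else List.replicate (grid.headD "").length 0
          let mid := ((grid.map (pvOccRow (grid.headD "").length)).map (pvHsRow (grid.headD "").length)).getD row []
          (List.range (grid.headD "").length).foldl (fun st col =>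
            if pvCell grid row col = '.' then
              let neighbours := up.getD col 0 + mid.getD col 0 + dn.getD col 0
              if neighbours > st.2.2 then ((row : Int), (col : Int), neighbours) else st
            else st) st) ((-1 : Int), (-1 : Int), (0 : Int)) := by
      apply PySem.List.foldl_congr_mem
      intro st row hrow
      have hrow' : row < grid.length := List.mem_range.mp hrow
      apply PySem.List.foldl_congr_mem
      intro st2 col hcol
      have hcol' : col < (grid.headD "").length := List.mem_range.mp hcol
      by_cases hdot : pvCell grid row col = '.'
      · rw [if_pos hdot, if_pos hdot]
        rw [cell_eq grid row col hrow' hcol' hdot]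
      · rw [if_neg hdot, if_neg hdot]
    rw [hfold]

-- ===== VERDICT (by name: the statement is the Claim_ definition above) =====
theorem mirko_location_spec : Claim_equal_mirko_location := by
  intro grid _ _
  unfold Spec_mirko_location
  exact ports_eq grid
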